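-- pv_equiv track=rewrite | github.com/sashank0944/stem-career-explorer-tsa | app.py | score_quiz
-- ===== SOURCE A (Python) =====
-- def score_quiz(answers):
--     scores = {"investigator": 0, "builder": 0, "innovator": 0, "analyst": 0, "healer": 0, "changer": 0}
--     for answer in answers:
--         if answer in scores:
--             scores[answer] += 1
--     sorted_scores = sorted(scores.items(), key=lambda x: x[1], reverse=True)
--     top_persona = sorted_scores[0][0]
--     second_persona = sorted_scores[1][0] if sorted_scores[1][1] > 0 else None
--     return top_persona, second_persona, scores
-- ===== SOURCE B (Python) =====
-- def score_quiz(answers):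
--     personas = ["investigator", "builder", "innovator", "analyst", "healer", "changer"]
--     scores = {p: answers.count(p) for p in personas}
--     best_key, best_val = "", -1
--     second_key, second_val = "", -1
--     for k, v in scores.items():
--         if v > best_val:
--             second_key, second_val = best_key, best_val
--             best_key, best_val = k, v
--         elif v > second_val:
--             second_key, second_val = k, v
--     second_persona = second_key if second_val > 0 else None
--     return best_key, second_persona, scores
-- ===== Notes on version B (the rewrite author's own statement) =====
-- stated objective: alternative
-- what changed: B builds the scores via a dict comprehension with list.count per persona and replaces the full descending sort with a single linear top-2 scan using strict '>' (with a -1 sentinel) so ties resolve to the earliest-inserted key, exactly like the stable sort.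
import Mathlib
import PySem

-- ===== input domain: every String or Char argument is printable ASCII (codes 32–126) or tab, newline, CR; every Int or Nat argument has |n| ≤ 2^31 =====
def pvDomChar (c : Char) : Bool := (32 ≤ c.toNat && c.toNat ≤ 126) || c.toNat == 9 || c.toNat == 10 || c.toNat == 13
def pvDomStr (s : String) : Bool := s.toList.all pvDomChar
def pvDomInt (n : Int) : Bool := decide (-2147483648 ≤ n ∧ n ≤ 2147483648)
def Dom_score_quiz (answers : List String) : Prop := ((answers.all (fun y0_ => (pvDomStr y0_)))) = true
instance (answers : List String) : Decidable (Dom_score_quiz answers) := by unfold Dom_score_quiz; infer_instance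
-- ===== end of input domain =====

-- B replaces A's full descending sort with a single linear top-2 scan over the counts
-- (strict '>' keeps the stable sort's insertion-order tie-break); objective: alternative.

-- ===== PORT A =====
-- the body of A's for-loop, as a named helper
def stepA (d : PySem.Dict String Int) (answer : String) : PySem.Dict String Int :=
  if d.contains answer then d.modify answer 0 (· + 1) else d

def score_quiz (answers : List String) : String × Option String × (List (String × Int)) :=
  let scores : PySem.Dict String Int :=
    answers.foldl stepA
      (PySem.Dict.ofList
        [("investigator", 0), ("builder", 0), ("innovator", 0),
         ("analyst", 0), ("healer", 0), ("changer", 0)])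
  let sorted_scores := PySem.List.sorted scores.items (fun x => x.2) true
  -- sorted_scores always has 6 elements, so the Python indexings never raise;
  -- .getD supplies the (unreachable) none case of pyGet?
  let top_persona := ((PySem.List.pyGet? sorted_scores 0).getD ("", 0)).1
  let p1 := (PySem.List.pyGet? sorted_scores 1).getD ("", 0)
  let second_persona := if p1.2 > 0 then some p1.1 else none
  (top_persona, second_persona, scores.items)

-- ===== PORT B =====
def score_quiz_alt (answers : List String) : String × Option String × (List (String × Int)) :=
  let personas := ["investigator", "builder", "innovator", "analyst", "healer", "changer"]
  let scores := personas.map (fun p => (p, (PySem.List.count answers p : Int)))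
  let sel := scores.foldl
    (fun (st : (String × Int) × (String × Int)) kv =>
      if kv.2 > st.1.2 then (kv, st.1)
      else if kv.2 > st.2.2 then (st.1, kv) else st)
    (("", -1), ("", -1))
  let second_persona := if sel.2.2 > 0 then some sel.2.1 else none
  (sel.1.1, second_persona, scores)

-- ===== PRECONDITION & SPEC =====
def Spec_score_quiz (answers : List String) (out : String × Option String × (List (String × Int))) : Prop := out = score_quiz_alt answers
instance (answers : List String) (out : String × Option String × (List (String × Int))) : Decidable (Spec_score_quiz answers out) := by unfold Spec_score_quiz; infer_instance

-- ===== CLAIM (what is proved, stated in full; the proofs are below) =====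
def Claim_equal_score_quiz : Prop := ∀ (answers : List String), Dom_score_quiz answers → Spec_score_quiz answers (score_quiz answers)

-- ===== LEMMAS AND PROOFS =====

-- A's counting fold over the 6-key literal dict, with the six running totals generalized.
theorem items_fold_count (l : List String) (c1 c2 c3 c4 c5 c6 : Int) :
    (l.foldl stepA
      (PySem.Dict.mk
        [("investigator", c1), ("builder", c2), ("innovator", c3),
         ("analyst", c4), ("healer", c5), ("changer", c6)])).items =
      [("investigator", c1 + l.count "investigator"), ("builder", c2 + l.count "builder"),
       ("innovator", c3 + l.count "innovator"), ("analyst", c4 + l.count "analyst"),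
       ("healer", c5 + l.count "healer"), ("changer", c6 + l.count "changer")] := by
  induction l generalizing c1 c2 c3 c4 c5 c6 with
  | nil => simp
  | cons a l ih =>
    rw [List.foldl_cons]
    by_cases h1 : a = "investigator"
    · subst h1
      have hd : stepA (PySem.Dict.mk
          [("investigator", c1), ("builder", c2), ("innovator", c3),
           ("analyst", c4), ("healer", c5), ("changer", c6)]) "investigator" =
          PySem.Dict.mk
          [("investigator", c1 + 1), ("builder", c2), ("innovator", c3),
           ("analyst", c4), ("healer", c5), ("changer", c6)] := by
        simp [stepA, PySem.Dict.contains, PySem.Dict.modify, PySem.Dict.insert,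
          PySem.Dict.getD, PySem.Dict.get?]
      rw [hd, ih]
      simp
      omega
    · by_cases h2 : a = "builder"
      · subst h2
        have hd : stepA (PySem.Dict.mk
            [("investigator", c1), ("builder", c2), ("innovator", c3),
             ("analyst", c4), ("healer", c5), ("changer", c6)]) "builder" =
            PySem.Dict.mk
            [("investigator", c1), ("builder", c2 + 1), ("innovator", c3),
             ("analyst", c4), ("healer", c5), ("changer", c6)] := by
          simp [stepA, PySem.Dict.contains, PySem.Dict.modify, PySem.Dict.insert,
            PySem.Dict.getD, PySem.Dict.get?]
        rw [hd, ih]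
        simp
        omega
      · by_cases h3 : a = "innovator"
        · subst h3
          have hd : stepA (PySem.Dict.mk
              [("investigator", c1), ("builder", c2), ("innovator", c3),
               ("analyst", c4), ("healer", c5), ("changer", c6)]) "innovator" =
              PySem.Dict.mk
              [("investigator", c1), ("builder", c2), ("innovator", c3 + 1),
               ("analyst", c4), ("healer", c5), ("changer", c6)] := by
            simp [stepA, PySem.Dict.contains, PySem.Dict.modify, PySem.Dict.insert,
              PySem.Dict.getD, PySem.Dict.get?]
          rw [hd, ih]
          simp
          omega
        · by_cases h4 : a = "analyst"
          · subst h4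
            have hd : stepA (PySem.Dict.mk
                [("investigator", c1), ("builder", c2), ("innovator", c3),
                 ("analyst", c4), ("healer", c5), ("changer", c6)]) "analyst" =
                PySem.Dict.mk
                [("investigator", c1), ("builder", c2), ("innovator", c3),
                 ("analyst", c4 + 1), ("healer", c5), ("changer", c6)] := by
              simp [stepA, PySem.Dict.contains, PySem.Dict.modify, PySem.Dict.insert,
                PySem.Dict.getD, PySem.Dict.get?]
            rw [hd, ih]
            simp
            omega
          · by_cases h5 : a = "healer"
            · subst h5
              have hd : stepA (PySem.Dict.mk
                  [("investigator", c1), ("builder", c2), ("innovator", c3),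
                   ("analyst", c4), ("healer", c5), ("changer", c6)]) "healer" =
                  PySem.Dict.mk
                  [("investigator", c1), ("builder", c2), ("innovator", c3),
                   ("analyst", c4), ("healer", c5 + 1), ("changer", c6)] := by
                simp [stepA, PySem.Dict.contains, PySem.Dict.modify, PySem.Dict.insert,
                  PySem.Dict.getD, PySem.Dict.get?]
              rw [hd, ih]
              simp
              omega
            · by_cases h6 : a = "changer"
              · subst h6
                have hd : stepA (PySem.Dict.mk
                    [("investigator", c1), ("builder", c2), ("innovator", c3),
                     ("analyst", c4), ("healer", c5), ("changer", c6)]) "changer" =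
                    PySem.Dict.mk
                    [("investigator", c1), ("builder", c2), ("innovator", c3),
                     ("analyst", c4), ("healer", c5), ("changer", c6 + 1)] := by
                  simp [stepA, PySem.Dict.contains, PySem.Dict.modify, PySem.Dict.insert,
                    PySem.Dict.getD, PySem.Dict.get?]
                rw [hd, ih]
                simp
                omega
              · have hd : stepA (PySem.Dict.mk
                    [("investigator", c1), ("builder", c2), ("innovator", c3),
                     ("analyst", c4), ("healer", c5), ("changer", c6)]) a =
                    PySem.Dict.mk
                    [("investigator", c1), ("builder", c2), ("innovator", c3),
                     ("analyst", c4), ("healer", c5), ("changer", c6)] := by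
                  have hc : (PySem.Dict.mk
                      [("investigator", c1), ("builder", c2), ("innovator", c3),
                       ("analyst", c4), ("healer", c5), ("changer", c6)]).contains a = false := by
                    simp [PySem.Dict.contains]
                    exact ⟨Ne.symm h1, Ne.symm h2, Ne.symm h3, Ne.symm h4, Ne.symm h5, Ne.symm h6⟩
                  simp [stepA, hc]
                rw [hd, ih]
                simp [h1, h2, h3, h4, h5, h6]

-- the first two elements of a list, padded with the scan's sentinel
def top2 (s : List (String × Int)) : (String × Int) × (String × Int) :=
  (s[0]?.getD ("", -1), s[1]?.getD ("", -1))

-- one scan step mirrors one insertion of the insertion sort, on the first two slots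
theorem step_top2 (s : List (String × Int)) (x : String × Int) (hx : 0 ≤ x.2) :
    (if x.2 > (top2 s).1.2 then (x, (top2 s).1)
     else if x.2 > (top2 s).2.2 then ((top2 s).1, x) else top2 s) =
    top2 (PySem.List.insertBy (fun a b => decide ((b : String × Int).2 < a.2)) x s) := by
  match s with
  | [] =>
    simp [top2, PySem.List.insertBy]
    intro h; omega
  | [y] =>
    by_cases h : y.2 < x.2 <;> simp [top2, PySem.List.insertBy, h]
    omega
  | y :: z :: rest =>
    by_cases h : y.2 < x.2
    · simp [top2, PySem.List.insertBy, h]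
    · by_cases h2 : z.2 < x.2
      · simp [top2, PySem.List.insertBy, h, h2]
      · simp [top2, PySem.List.insertBy, h, h2]

-- the whole scan computes the first two elements of the insertion sort
theorem foldl_top2 (l : List (String × Int)) (s : List (String × Int))
    (hl : ∀ x ∈ l, 0 ≤ x.2) :
    l.foldl
      (fun (st : (String × Int) × (String × Int)) kv =>
        if kv.2 > st.1.2 then (kv, st.1)
        else if kv.2 > st.2.2 then (st.1, kv) else st)
      (top2 s) =
    top2 (l.foldl (fun acc x =>
      PySem.List.insertBy (fun a b => decide ((b : String × Int).2 < a.2)) x acc) s) := by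
  induction l generalizing s with
  | nil => rfl
  | cons x l ih =>
    simp only [List.foldl_cons]
    rw [step_top2 s x (hl x (by simp))]
    exact ih _ (fun y hy => hl y (by simp [hy]))

-- ===== VERDICT (by name: the statement is the Claim_ definition above) =====
theorem score_quiz_spec : Claim_equal_score_quiz := by
  intro answers _
  unfold Spec_score_quiz score_quiz score_quiz_alt
  have hitems := items_fold_count answers 0 0 0 0 0 0
  have hofList : (PySem.Dict.ofList
      [("investigator", (0:Int)), ("builder", 0), ("innovator", 0),
       ("analyst", 0), ("healer", 0), ("changer", 0)] : PySem.Dict String Int) =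
      PySem.Dict.mk
      [("investigator", 0), ("builder", 0), ("innovator", 0),
       ("analyst", 0), ("healer", 0), ("changer", 0)] := by decide
  simp only [hofList, hitems, zero_add]
  -- name the six counts
  set c1 := (answers.count "investigator" : Int) with hc1
  set c2 := (answers.count "builder" : Int) with hc2
  set c3 := (answers.count "innovator" : Int) with hc3
  set c4 := (answers.count "analyst" : Int) with hc4
  set c5 := (answers.count "healer" : Int) with hc5
  set c6 := (answers.count "changer" : Int) with hc6
  have h1 : 0 ≤ c1 := by rw [hc1]; positivity
  have h2 : 0 ≤ c2 := by rw [hc2]; positivity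
  have h3 : 0 ≤ c3 := by rw [hc3]; positivity
  have h4 : 0 ≤ c4 := by rw [hc4]; positivity
  have h5 : 0 ≤ c5 := by rw [hc5]; positivity
  have h6 : 0 ≤ c6 := by rw [hc6]; positivity
  set L : List (String × Int) :=
    [("investigator", c1), ("builder", c2), ("innovator", c3),
     ("analyst", c4), ("healer", c5), ("changer", c6)] with hL
  have hLcount : L = [("investigator", c1), ("builder", c2), ("innovator", c3),
     ("analyst", c4), ("healer", c5), ("changer", c6)] := hL
  -- B's scores list is L
  have hB : (["investigator", "builder", "innovator", "analyst", "healer", "changer"].map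
      (fun p => (p, (PySem.List.count answers p : Int)))) = L := by
    simp [hL, PySem.List.count, hc1, hc2, hc3, hc4, hc5, hc6]
  rw [hB]
  -- relate the scan over L to the sorted list
  have hvals : ∀ x ∈ L, 0 ≤ x.2 := by
    intro x hx
    rw [hLcount] at hx
    fin_cases hx <;> assumption
  have hsorted : PySem.List.sorted L (fun x => x.2) true =
      L.foldl (fun acc x =>
        PySem.List.insertBy (fun a b => decide ((b : String × Int).2 < a.2)) x acc) [] :=
    PySem.List.sorted_rev_eq_foldl_insertBy L (fun x => x.2)
  have hscan := foldl_top2 L [] hvals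
  have htop2nil : top2 ([] : List (String × Int)) = (("", -1), ("", -1)) := rfl
  rw [htop2nil] at hscan
  rw [hscan, ← hsorted]
  -- the sorted list has 6 elements, so both pyGet? hit real entries
  have hlen : (PySem.List.sorted L (fun x => x.2) true).length = 6 := by
    rw [PySem.List.length_sorted, hLcount]; rfl
  set S := PySem.List.sorted L (fun x => x.2) true with hS
  match hSm : S, hlen with
  | a :: b :: rest, _ =>
    simp [top2]
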